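-- pv_equiv track=rewrite | github.com/future-item/ILP-CoT | LLM_try2_1_25/prolog.py | post_rules_process
-- ===== SOURCE A (Python) =====
-- from collections import defaultdict
--
-- def post_rules_process(input_text):
--     # 处理输入数据
--     rules = set()
--     for line in input_text.strip().splitlines():
--         conditions = line.split(':-')[1].rstrip('.').split(',')
--         conditions = tuple(sorted(set(conditions)))  # 排序去重
--         rules.add(conditions)
--
--     # 合并逻辑：将含公共项的规则合并
--     combined_rules = defaultdict(set)
--     for rule in rules:
--         key = frozenset(rule)
--         combined_rules[key].update(rule)
--
--     # 去掉完全被其他规则覆盖的规则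
--     final_rules = set()
--     for rule_set in combined_rules.values():
--         is_subsumed = any(rule_set < other for other in combined_rules.values() if rule_set != other)
--         if not is_subsumed:
--             final_rules.add(tuple(sorted(rule_set)))
--     return final_rules
-- ===== SOURCE B (Python) =====
-- def post_rules_process(input_text):
--     # parse: one pass, keeping distinct rules in first-appearance order
--     rules = []
--     for line in input_text.strip().splitlines():
--         rule = tuple(sorted(set(line.split(':-')[1].rstrip('.').split(','))))
--         if rule not in rules:
--             rules.append(rule)
--     # keep only maximal rules: scan in descending size; a rule is dropped
--     # exactly when it is a strict subset of an already-kept (larger) rule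
--     kept = []
--     for rule in sorted(rules, key=len, reverse=True):
--         if not any(set(rule) < set(k) for k in kept):
--             kept.append(rule)
--     return {r for r in rules if r in kept}
-- ===== Notes on version B (the rewrite author's own statement) =====
-- stated objective: alternative
-- what changed: Drops A's redundant frozenset-keyed defaultdict pass and its all-pairs strict-subset test; B sorts the distinct rules by size descending and makes one scan that keeps a rule only if it is not a strict subset of an already-kept larger rule, then returns the surviving rules; lines without ':-' (where A raises IndexError) are excluded by Pre_.
import Mathlib
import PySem

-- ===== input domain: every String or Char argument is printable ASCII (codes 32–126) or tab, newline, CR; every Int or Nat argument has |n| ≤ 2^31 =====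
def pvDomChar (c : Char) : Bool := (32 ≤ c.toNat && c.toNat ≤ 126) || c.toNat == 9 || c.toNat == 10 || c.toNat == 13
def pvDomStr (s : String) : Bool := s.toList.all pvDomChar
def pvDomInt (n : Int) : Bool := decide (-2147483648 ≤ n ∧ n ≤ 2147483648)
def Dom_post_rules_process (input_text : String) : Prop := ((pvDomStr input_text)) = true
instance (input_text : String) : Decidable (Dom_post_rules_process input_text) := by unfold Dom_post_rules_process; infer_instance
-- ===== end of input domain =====

-- B replaces A's frozenset-keyed defaultdict pass and all-pairs strict-subset test by one
-- descending-size scan that keeps only maximal rules; same return value (the result is a set).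

-- ===== PORT A =====
-- s.rstrip('.') has no PySem primitive taking a character set: ported by hand, exact —
-- it removes exactly the maximal run of trailing '.' characters
def pvRstripDot (cs : List Char) : List Char :=
  (cs.reverse.dropWhile (fun c => c == '.')).reverse

-- the parse step, identical in both Pythons:
-- tuple(sorted(set(line.split(':-')[1].rstrip('.').split(','))))
-- (the [1] is in range exactly when ':-' occurs in the line — Pre_ below)
def pvCanon (line : String) : List String :=
  PySem.List.sorted
    (PySem.Set.ofList
      ((PySem.Chars.splitOn
          (pvRstripDot (PySem.List.pyGetD (PySem.Chars.splitOn line.toList [':', '-']) 1 []))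
          [',']).map String.mk))
    (fun x => x)

-- the first loop, identical in both Pythons: the distinct parsed rules (a Python set /
-- an ordered duplicate-free list)
def pvRules (input_text : String) : List (List String) :=
  (PySem.Str.splitlines (PySem.Str.strip input_text)).foldl
    (fun rules line => PySem.Set.add rules (pvCanon line)) []

def post_rules_process (input_text : String) : List (List String) :=
  let rules := pvRules input_text
  -- combined_rules = defaultdict(set) keyed by frozenset(rule); every rule is a sorted
  -- duplicate-free list, so frozenset equality coincides with list equality and the key
  -- is modelled by the rule list itself (exact here)
  let combined_rules :=
    rules.foldl
      (fun d rule => d.modify rule PySem.Set.empty (fun s => PySem.Set.update s rule))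
      (PySem.Dict.empty : PySem.Dict (List String) (PySem.Set String))
  combined_rules.values.foldl
    (fun final_rules rule_set =>
      let is_subsumed := combined_rules.values.any (fun other =>
        if PySem.Set.equal rule_set other then false
        else PySem.Set.issubset rule_set other && !(PySem.Set.equal rule_set other))
      if is_subsumed then final_rules
      else PySem.Set.add final_rules (PySem.List.sorted rule_set (fun x => x))) []

-- ===== PORT B =====
-- the loop body of B's single keep-maximal scan: drop the rule iff it is a strict
-- subset of an already-kept rule
def pvKeptStep (kept : List (List String)) (rule : List String) : List (List String) :=
  if kept.any (fun k =>
      PySem.Set.issubset (PySem.Set.ofList rule) (PySem.Set.ofList k) &&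
      !(PySem.Set.equal (PySem.Set.ofList rule) (PySem.Set.ofList k)))
  then kept else kept ++ [rule]

def post_rules_process_alt (input_text : String) : List (List String) :=
  let rules := pvRules input_text
  let kept :=
    (PySem.List.sorted rules (fun rule => (rule.length : Int)) true).foldl pvKeptStep []
  PySem.Set.ofList (rules.filter (fun r => kept.contains r))

-- ===== PRECONDITION & SPEC =====
-- Pre_ excludes exactly the inputs with a stripped line not containing ':-',
-- on which Python A raises IndexError at line.split(':-')[1]
def Pre_post_rules_process (input_text : String) : Prop :=
  ∀ line ∈ PySem.Str.splitlines (PySem.Str.strip input_text), PySem.Str.isIn ":-" line = true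
instance (input_text : String) : Decidable (Pre_post_rules_process input_text) := by
  unfold Pre_post_rules_process; infer_instance

def pvWitness_post_rules_process : String := "p(X):-q(X),r(X).\nt:-q(X)."

def Spec_post_rules_process (input_text : String) (out : List (List String)) : Prop :=
  out = post_rules_process_alt input_text
instance (input_text : String) (out : List (List String)) : Decidable (Spec_post_rules_process input_text out) := by
  unfold Spec_post_rules_process; infer_instance

-- ===== CLAIM =====
def Claim_equal_post_rules_process : Prop :=
  ∀ (input_text : String), Dom_post_rules_process input_text →
    Pre_post_rules_process input_text →
    Spec_post_rules_process input_text (post_rules_process input_text)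

-- ===== LEMMAS AND PROOFS =====

-- every parsed rule is canonical: strictly increasing (hence duplicate-free and the
-- unique such listing of its element set)
lemma pv_canon_pairwise (line : String) : List.Pairwise (fun a b => a < b) (pvCanon line) :=
  PySem.List.sorted_ofList_pairwise_lt _

lemma pv_canon_nodup {r : List String} (h : List.Pairwise (fun a b => a < b) r) : r.Nodup :=
  h.imp (fun hab => ne_of_lt hab)

lemma pv_rules_eq (t : String) :
    pvRules t = PySem.Set.ofList ((PySem.Str.splitlines (PySem.Str.strip t)).map pvCanon) := by
  unfold pvRules
  rw [← PySem.Set.update_map_eq_foldl_add, PySem.Set.update_nil_left]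

lemma pv_rules_nodup (t : String) : (pvRules t).Nodup := by
  rw [pv_rules_eq]; exact PySem.Set.nodup_ofList _

lemma pv_rules_canon (t : String) :
    ∀ r ∈ pvRules t, List.Pairwise (fun a b => a < b) r := by
  intro r hr
  rw [pv_rules_eq, PySem.Set.mem_ofList] at hr
  obtain ⟨line, -, rfl⟩ := List.mem_map.mp hr
  exact pv_canon_pairwise line

-- two canonical lists with the same members are equal
lemma pv_canon_eq {r s : List String} (hr : List.Pairwise (fun a b => a < b) r)
    (hs : List.Pairwise (fun a b => a < b) s) (h : ∀ x, x ∈ r ↔ x ∈ s) : r = s := by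
  have hp : s.Perm r :=
    (List.perm_ext_iff_of_nodup (pv_canon_nodup hs) (pv_canon_nodup hr)).mpr (fun a => (h a).symm)
  have h1 := PySem.List.sorted_id_eq_of_perm_of_pairwise r s hp (hs.imp (fun hab => le_of_lt hab))
  have h2 := PySem.List.sorted_eq_self_of_pairwise r (fun x => x) (hr.imp (fun hab => le_of_lt hab))
  rw [h2] at h1; exact h1

-- a strict subset of a canonical list is strictly shorter
lemma pv_len_lt {r s : List String} (hr : List.Pairwise (fun a b => a < b) r)
    (hs : List.Pairwise (fun a b => a < b) s) (hsub : r ⊆ s) (hne : r ≠ s) :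
    r.length < s.length := by
  rcases lt_or_ge r.length s.length with h | h
  · exact h
  · exfalso
    have hperm : r.Perm s := ((pv_canon_nodup hr).subperm hsub).perm_of_length_le h
    exact hne (pv_canon_eq hr hs (fun x => hperm.mem_iff))

def pvMaxIn (R : List (List String)) (r : List String) : Prop :=
  ∀ o ∈ R, r ⊆ o → r = o

-- every rule extends to a maximal rule (a longest superset is maximal)
lemma pv_exists_max_ext (R : List (List String))
    (hc : ∀ r ∈ R, List.Pairwise (fun a b => a < b) r) {o : List String} (ho : o ∈ R) :
    ∃ m ∈ R, pvMaxIn R m ∧ o ⊆ m := by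
  have hoC : o ∈ R.filter (fun x => decide (o ⊆ x)) := by
    simp [List.mem_filter, ho, List.Subset.refl]
  obtain ⟨m, hm⟩ : ∃ m, m ∈ List.argmax (fun x : List String => x.length)
      (R.filter (fun x => decide (o ⊆ x))) := by
    cases hA : List.argmax (fun x : List String => x.length) (R.filter (fun x => decide (o ⊆ x))) with
    | none => rw [List.argmax_eq_none] at hA; rw [hA] at hoC; cases hoC
    | some m => exact ⟨m, by simp⟩
  have hmC := List.argmax_mem hm
  have hmR : m ∈ R := (List.mem_filter.mp hmC).1
  have hom : o ⊆ m := by have := (List.mem_filter.mp hmC).2; simpa using this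
  refine ⟨m, hmR, ?_, hom⟩
  intro o' ho' hsub
  by_contra hne
  have hlt := pv_len_lt (hc m hmR) (hc o' ho') hsub hne
  have ho'C : o' ∈ R.filter (fun x => decide (o ⊆ x)) := by
    simp [List.mem_filter, ho']; exact hom.trans hsub
  exact List.not_lt_of_mem_argmax ho'C hm hlt

lemma pv_equal_canon {r o : List String} (hr : List.Pairwise (fun a b => a < b) r)
    (ho : List.Pairwise (fun a b => a < b) o) : PySem.Set.equal r o = true ↔ r = o := by
  rw [PySem.Set.equal_iff]
  exact ⟨fun h => pv_canon_eq hr ho h, fun h x => by rw [h]⟩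

-- A's subsumption test, named
def pvSubsumed (R : List (List String)) (rule_set : List String) : Bool :=
  R.any (fun other =>
    if PySem.Set.equal rule_set other then false
    else PySem.Set.issubset rule_set other && !(PySem.Set.equal rule_set other))

lemma pv_subsumed_iff {R : List (List String)}
    (hc : ∀ r ∈ R, List.Pairwise (fun a b => a < b) r) {r : List String}
    (hrc : List.Pairwise (fun a b => a < b) r) :
    pvSubsumed R r = true ↔ ¬ pvMaxIn R r := by
  have hoeq : ∀ o ∈ R,
      ((if PySem.Set.equal r o then false
        else PySem.Set.issubset r o && !(PySem.Set.equal r o)) = true) ↔ (r ⊆ o ∧ r ≠ o) := by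
    intro o ho
    by_cases he : PySem.Set.equal r o = true
    · have hro : r = o := (pv_equal_canon hrc (hc o ho)).mp he
      subst hro
      simp [he]
    · have hne : r ≠ o := fun h => he ((pv_equal_canon hrc (hc o ho)).mpr h)
      rw [Bool.not_eq_true] at he
      simp only [he, Bool.false_eq_true, if_false, Bool.and_eq_true, Bool.not_eq_true',
        PySem.Set.issubset_iff]
      constructor
      · rintro ⟨h1, -⟩; exact ⟨fun {x} hx => h1 x hx, hne⟩
      · rintro ⟨h1, -⟩; exact ⟨fun x hx => h1 hx, trivial⟩
  unfold pvSubsumed pvMaxIn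
  rw [List.any_eq_true]
  constructor
  · rintro ⟨o, ho, h⟩ hmax
    exact ((hoeq o ho).mp h).2 (hmax o ho ((hoeq o ho).mp h).1)
  · intro hnmax
    push_neg at hnmax
    obtain ⟨o, ho, hsub, hne⟩ := hnmax
    exact ⟨o, ho, (hoeq o ho).mpr ⟨hsub, hne⟩⟩

-- the defaultdict of A collapses: on distinct canonical keys its values list is
-- the rules list itself
lemma pv_getD_fold_not_mem {r : List String} :
    ∀ (l : List (List String)) (d : PySem.Dict (List String) (PySem.Set String)), r ∉ l →
    (l.foldl (fun d rule => d.modify rule PySem.Set.empty (fun s => PySem.Set.update s rule)) d).getD r PySem.Set.empty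
      = d.getD r PySem.Set.empty := by
  intro l
  induction l with
  | nil => intro d _; rfl
  | cons x t ih =>
    intro d h
    simp only [List.foldl_cons]
    rw [ih _ (fun hr => h (List.mem_cons_of_mem _ hr))]
    exact PySem.Dict.getD_modify_of_ne d _ _ (fun he => h (he ▸ List.mem_cons_self))

lemma pv_getD_fold_mem {r : List String} :
    ∀ (l : List (List String)) (d : PySem.Dict (List String) (PySem.Set String)),
    l.Nodup → r ∈ l → d.contains r = false →
    (l.foldl (fun d rule => d.modify rule PySem.Set.empty (fun s => PySem.Set.update s rule)) d).getD r PySem.Set.empty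
      = PySem.Set.ofList r := by
  intro l
  induction l with
  | nil => intro d _ hr _; cases hr
  | cons x t ih =>
    intro d hl hr hd
    simp only [List.foldl_cons]
    rcases List.mem_cons.mp hr with rfl | hrt
    · have hnt : r ∉ t := (List.nodup_cons.mp hl).1
      rw [pv_getD_fold_not_mem t _ hnt, PySem.Dict.getD_modify_self,
        PySem.Dict.getD_of_not_contains d _ hd]
      exact PySem.Set.update_nil_left r
    · have hne : r ≠ x := fun he => (List.nodup_cons.mp hl).1 (he ▸ hrt)
      apply ih _ (List.nodup_cons.mp hl).2 hrt
      rw [PySem.Dict.contains_modify]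
      simp [hne, hd]

set_option maxHeartbeats 1000000 in
lemma pv_values_combined (t : String) :
    ((pvRules t).foldl
      (fun d rule => d.modify rule PySem.Set.empty (fun s => PySem.Set.update s rule))
      (PySem.Dict.empty : PySem.Dict (List String) (PySem.Set String))).values = pvRules t := by
  have hnd := pv_rules_nodup t
  have hc := pv_rules_canon t
  have hkeys : ((pvRules t).foldl
      (fun d rule => d.modify rule PySem.Set.empty (fun s => PySem.Set.update s rule))
      (PySem.Dict.empty : PySem.Dict (List String) (PySem.Set String))).keys = pvRules t := by
    have h := PySem.Dict.keys_foldl_modify (pvRules t) (PySem.Set.empty : PySem.Set String)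
      (fun _ rule => fun s => PySem.Set.update s rule)
      (PySem.Dict.empty : PySem.Dict (List String) (PySem.Set String))
    simpa [PySem.Dict.keys_empty, PySem.Set.update_nil_left,
      PySem.Set.ofList_eq_self_of_nodup _ hnd] using h
  have hknd : ((pvRules t).foldl
      (fun d rule => d.modify rule PySem.Set.empty (fun s => PySem.Set.update s rule))
      (PySem.Dict.empty : PySem.Dict (List String) (PySem.Set String))).keys.Nodup := by
    rw [hkeys]; exact hnd
  rw [PySem.Dict.values_eq_map_keys _ hknd PySem.Set.empty, hkeys]
  have hpt : ∀ r ∈ pvRules t,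
      ((pvRules t).foldl
        (fun d rule => d.modify rule PySem.Set.empty (fun s => PySem.Set.update s rule))
        (PySem.Dict.empty : PySem.Dict (List String) (PySem.Set String))).getD r PySem.Set.empty = r := by
    intro r hrR
    rw [pv_getD_fold_mem (pvRules t) _ hnd hrR (PySem.Dict.contains_empty r)]
    exact PySem.Set.ofList_eq_self_of_nodup r (pv_canon_nodup (hc r hrR))
  rw [List.map_congr_left hpt]; simp

-- a conditional Set.add loop from a duplicate-free source is a filter
lemma pv_foldl_add_if (b : List String → Bool) :
    ∀ (l acc : List (List String)), l.Nodup → (∀ x ∈ l, x ∉ acc) →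
    List.foldl (fun fr r => if b r then fr else PySem.Set.add fr r) acc l
      = acc ++ l.filter (fun r => !b r) := by
  intro l
  induction l with
  | nil => intro acc _ _; simp
  | cons x t ih =>
    intro acc hnd hdis
    simp only [List.foldl_cons]
    have hxt : x ∉ t := (List.nodup_cons.mp hnd).1
    cases hb : b x with
    | true =>
      simp only [hb, if_true, List.filter_cons, Bool.not_true, Bool.false_eq_true, if_false]
      exact ih acc (List.nodup_cons.mp hnd).2 (fun y hy => hdis y (List.mem_cons_of_mem _ hy))
    | false =>
      have hadd : PySem.Set.add acc x = acc ++ [x] :=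
        PySem.Set.add_of_not_mem (hdis x List.mem_cons_self)
      simp only [hb, Bool.false_eq_true, if_false, hadd, List.filter_cons, Bool.not_false, if_true]
      rw [ih (acc ++ [x]) (List.nodup_cons.mp hnd).2 ?_, List.append_assoc]
      · rfl
      · intro y hy
        simp only [List.mem_append, List.mem_singleton]
        exact fun h => h.elim (hdis y (List.mem_cons_of_mem _ hy))
          (fun he => hxt (he ▸ hy))

-- B's scan keeps exactly the maximal rules
lemma pv_kept_inv (R : List (List String))
    (hc : ∀ r ∈ R, List.Pairwise (fun a b => a < b) r) :
    ∀ (l acc : List (List String)),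
      (∀ x ∈ l, x ∈ R) → l.Nodup →
      List.Pairwise (fun a b => b.length ≤ a.length) l →
      (∀ k ∈ acc, k ∈ R ∧ pvMaxIn R k) →
      (∀ m ∈ R, pvMaxIn R m → m ∉ l → m ∈ acc) →
      (∀ k ∈ List.foldl pvKeptStep acc l, k ∈ R ∧ pvMaxIn R k) ∧
      (∀ m ∈ R, pvMaxIn R m → m ∈ List.foldl pvKeptStep acc l) := by
  intro l
  induction l with
  | nil =>
    intro acc _ _ _ hacc hinv
    exact ⟨hacc, fun m hm hmax => hinv m hm hmax (by simp)⟩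
  | cons r t ih =>
    intro acc hmem hnd hpw hacc hinv
    have hrR : r ∈ R := hmem r List.mem_cons_self
    have hany : (acc.any (fun k =>
        PySem.Set.issubset (PySem.Set.ofList r) (PySem.Set.ofList k) &&
        !(PySem.Set.equal (PySem.Set.ofList r) (PySem.Set.ofList k))) = true)
        ↔ ∃ k ∈ acc, r ⊆ k ∧ r ≠ k := by
      rw [List.any_eq_true]
      constructor
      · rintro ⟨k, hk, hb⟩
        have hkR := (hacc k hk).1
        rw [PySem.Set.ofList_eq_self_of_nodup r (pv_canon_nodup (hc r hrR)),
            PySem.Set.ofList_eq_self_of_nodup k (pv_canon_nodup (hc k hkR)),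
            Bool.and_eq_true, Bool.not_eq_true'] at hb
        refine ⟨k, hk, fun {x} hx => (PySem.Set.issubset_iff r k).mp hb.1 x hx, fun he => ?_⟩
        rw [(pv_equal_canon (hc r hrR) (hc k hkR)).mpr he] at hb
        exact absurd hb.2 (by simp)
      · rintro ⟨k, hk, hsub, hne⟩
        have hkR := (hacc k hk).1
        refine ⟨k, hk, ?_⟩
        rw [PySem.Set.ofList_eq_self_of_nodup r (pv_canon_nodup (hc r hrR)),
            PySem.Set.ofList_eq_self_of_nodup k (pv_canon_nodup (hc k hkR)),
            Bool.and_eq_true, Bool.not_eq_true']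
        refine ⟨(PySem.Set.issubset_iff r k).mpr (fun x hx => hsub hx), ?_⟩
        rw [Bool.eq_false_iff]
        exact fun he => hne ((pv_equal_canon (hc r hrR) (hc k hkR)).mp he)
    simp only [List.foldl_cons]
    by_cases hM : pvMaxIn R r
    · have hfalse : (acc.any (fun k =>
          PySem.Set.issubset (PySem.Set.ofList r) (PySem.Set.ofList k) &&
          !(PySem.Set.equal (PySem.Set.ofList r) (PySem.Set.ofList k))) = false) := by
        rw [Bool.eq_false_iff]
        intro h
        obtain ⟨k, hk, hsub, hne⟩ := hany.mp h
        exact hne (hM k (hacc k hk).1 hsub)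
      have hstep : pvKeptStep acc r = acc ++ [r] := by
        unfold pvKeptStep; rw [hfalse]; rfl
      rw [hstep]
      apply ih (acc ++ [r])
        (fun x hx => hmem x (List.mem_cons_of_mem _ hx))
        (List.nodup_cons.mp hnd).2
        (List.pairwise_cons.mp hpw).2
      · intro k hk
        rcases List.mem_append.mp hk with hk | hk
        · exact hacc k hk
        · rw [List.mem_singleton.mp hk]; exact ⟨hrR, hM⟩
      · intro m hm hmax hnt
        by_cases hmr : m = r
        · exact List.mem_append.mpr (Or.inr (by simp [hmr]))
        · exact List.mem_append.mpr (Or.inl (hinv m hm hmax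
            (fun hmem' => (List.mem_cons.mp hmem').elim hmr hnt)))
    · have hM' : ∃ o ∈ R, r ⊆ o ∧ r ≠ o := by
        unfold pvMaxIn at hM; push_neg at hM; exact hM
      obtain ⟨o, ho, hsub, hne⟩ := hM'
      obtain ⟨m, hmR, hmMax, hom⟩ := pv_exists_max_ext R hc ho
      have hrm : r ⊆ m := hsub.trans hom
      have hrnem : r ≠ m := by
        rintro rfl
        exact hne (pv_canon_eq (hc r hrR) (hc o ho) (fun x => ⟨fun hx => hsub hx, fun hx => hom hx⟩))
      have hlen : r.length < m.length := pv_len_lt (hc r hrR) (hc m hmR) hrm hrnem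
      have hmnotl : m ∉ r :: t := by
        intro hm
        rcases List.mem_cons.mp hm with rfl | hmt
        · exact absurd hlen (lt_irrefl _)
        · have := (List.pairwise_cons.mp hpw).1 m hmt; omega
      have hmacc : m ∈ acc := hinv m hmR hmMax hmnotl
      have htrue : (acc.any (fun k =>
          PySem.Set.issubset (PySem.Set.ofList r) (PySem.Set.ofList k) &&
          !(PySem.Set.equal (PySem.Set.ofList r) (PySem.Set.ofList k))) = true) :=
        hany.mpr ⟨m, hmacc, hrm, hrnem⟩
      have hstep : pvKeptStep acc r = acc := by
        unfold pvKeptStep; rw [htrue]; rfl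
      rw [hstep]
      apply ih acc
        (fun x hx => hmem x (List.mem_cons_of_mem _ hx))
        (List.nodup_cons.mp hnd).2
        (List.pairwise_cons.mp hpw).2
        hacc
      intro m' hm' hmax' hnt
      by_cases hm'r : m' = r
      · exact absurd (hm'r ▸ hmax') hM
      · exact hinv m' hm' hmax' (fun hmem' => (List.mem_cons.mp hmem').elim hm'r hnt)

lemma pv_kept_mem (t : String) {x : List String} :
    x ∈ List.foldl pvKeptStep []
        (PySem.List.sorted (pvRules t) (fun rule => (rule.length : Int)) true)
      ↔ x ∈ pvRules t ∧ pvMaxIn (pvRules t) x := by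
  have hnd := pv_rules_nodup t
  have hc := pv_rules_canon t
  have hperm := PySem.List.sorted_perm (pvRules t) (fun rule => (rule.length : Int)) true
  have h := pv_kept_inv (pvRules t) hc
    (PySem.List.sorted (pvRules t) (fun rule => (rule.length : Int)) true) []
    (fun y hy => (PySem.List.mem_sorted _ _ _ _).mp hy)
    (hperm.nodup_iff.mpr hnd)
    ((PySem.List.sorted_pairwise_rev (pvRules t) (fun rule => (rule.length : Int))).imp
      (fun hab => by exact_mod_cast hab))
    (by simp)
    (fun m hm hmax hns => absurd ((PySem.List.mem_sorted _ _ _ _).mpr hm) hns)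
  exact ⟨fun hx => h.1 x hx, fun hx => h.2 x hx.1 hx.2⟩

-- characterizations of the two ports
lemma pv_A_char (t : String) :
    post_rules_process t = (pvRules t).filter (fun r => !pvSubsumed (pvRules t) r) := by
  have hnd := pv_rules_nodup t
  have hc := pv_rules_canon t
  simp only [post_rules_process]
  rw [pv_values_combined t]
  rw [PySem.List.foldl_congr_mem _ _
    (fun fr r => if pvSubsumed (pvRules t) r then fr else PySem.Set.add fr r) _
    (fun acc x hx => by
      simp only [PySem.List.sorted_eq_self_of_pairwise x (fun x => x)
        ((hc x hx).imp (fun hab => le_of_lt hab))]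
      rfl)]
  rw [pv_foldl_add_if (pvSubsumed (pvRules t)) (pvRules t) [] hnd (by simp)]
  rw [List.nil_append]

lemma pv_B_char (t : String) :
    post_rules_process_alt t = (pvRules t).filter (fun r =>
      (List.foldl pvKeptStep []
        (PySem.List.sorted (pvRules t) (fun rule => (rule.length : Int)) true)).contains r) := by
  simp only [post_rules_process_alt]
  exact PySem.Set.ofList_eq_self_of_nodup _ ((pv_rules_nodup t).filter _)

-- ===== VERDICT =====
theorem post_rules_process_spec : Claim_equal_post_rules_process := by
  intro t _ _
  unfold Spec_post_rules_process
  rw [pv_A_char, pv_B_char]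
  apply List.filter_congr
  intro r hrR
  by_cases hM : pvMaxIn (pvRules t) r
  · have h1 : pvSubsumed (pvRules t) r = false := by
      rw [Bool.eq_false_iff]
      exact fun h => (pv_subsumed_iff (pv_rules_canon t) (pv_rules_canon t r hrR)).mp h hM
    have h2 : r ∈ List.foldl pvKeptStep []
        (PySem.List.sorted (pvRules t) (fun rule => (rule.length : Int)) true) :=
      (pv_kept_mem t).mpr ⟨hrR, hM⟩
    simp [h1, h2]
  · have h1 : pvSubsumed (pvRules t) r = true :=
      (pv_subsumed_iff (pv_rules_canon t) (pv_rules_canon t r hrR)).mpr hM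
    have h2 : r ∉ List.foldl pvKeptStep []
        (PySem.List.sorted (pvRules t) (fun rule => (rule.length : Int)) true) :=
      fun hk => hM ((pv_kept_mem t).mp hk).2
    simp [h1, h2]
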